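-- pv_equiv track=rewrite | github.com/faderskd/algorithms | strings.py | replace_in_place
-- ===== SOURCE A (Python) =====
-- def replace_in_place(string):
--     i = j = 0
--     string = list(string)
--     while j < len(string) - 1:
--         if string[j] == 'A' and string[j + 1] == 'B':
--             string[i] = 'C'
--             j += 2
--         else:
--             string[i] = string[j]
--             j += 1
--         i += 1
--
--     if j == len(string) - 1:
--         string[i] = string[j]
--         i += 1
--     return "".join(string[:i])
-- ===== SOURCE B (Python) =====
-- def replace_in_place(string):
--     return string.replace("AB", "C")
-- ===== Notes on version B (the rewrite author's own statement) =====
-- stated objective: idiomatic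
-- what changed: The manual two-pointer in-place overwrite loop over a char list is replaced by a single call to the built-in str.replace, which performs the same greedy left-to-right non-overlapping substitution.
import Mathlib
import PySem

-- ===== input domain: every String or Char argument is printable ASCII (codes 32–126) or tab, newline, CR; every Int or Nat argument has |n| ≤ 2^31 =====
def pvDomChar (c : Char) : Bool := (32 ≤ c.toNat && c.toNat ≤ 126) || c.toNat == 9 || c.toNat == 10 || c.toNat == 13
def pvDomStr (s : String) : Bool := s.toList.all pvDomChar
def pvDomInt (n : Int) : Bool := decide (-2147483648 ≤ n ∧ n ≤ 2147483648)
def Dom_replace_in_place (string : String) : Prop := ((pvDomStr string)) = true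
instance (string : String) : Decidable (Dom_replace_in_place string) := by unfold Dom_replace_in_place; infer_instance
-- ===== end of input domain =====

-- B replaces A's manual two-pointer overwrite loop by the idiomatic built-in replace("AB","C") (same behaviour; no speed claim).
-- A mutates only its local list copy of the argument, so there is no caller-visible mutation.

-- ===== PORT A =====
-- while loop of A: state is the char list (mutated via set), write index i, read index j
def replace_in_place_loop (s : List Char) (i j : Nat) : List Char × Nat :=
  if (j : Int) < (s.length : Int) - 1 then
    if PySem.List.pyGet? s (j : Int) = some 'A' ∧ PySem.List.pyGet? s ((j : Int) + 1) = some 'B' then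
      replace_in_place_loop (s.set i 'C') (i + 1) (j + 2)
    else
      replace_in_place_loop (s.set i ((PySem.List.pyGet? s (j : Int)).getD ' ')) (i + 1) (j + 1)
  else if (j : Int) = (s.length : Int) - 1 then
    (s.set i ((PySem.List.pyGet? s (j : Int)).getD ' '), i + 1)
  else
    (s, i)
termination_by s.length - j
decreasing_by all_goals simp_all [List.length_set]; omega

def replace_in_place (string : String) : String :=
  let r := replace_in_place_loop string.toList 0 0
  String.ofList (r.1.take r.2)

-- ===== PORT B =====
def replace_in_place_alt (string : String) : String :=
  PySem.Str.replace string "AB" "C"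

-- ===== PRECONDITION & SPEC =====
def Spec_replace_in_place (string : String) (out : String) : Prop := out = replace_in_place_alt string
instance (string : String) (out : String) : Decidable (Spec_replace_in_place string out) := by unfold Spec_replace_in_place; infer_instance

-- ===== CLAIM (what is proved, stated in full; the proofs are below) =====
def Claim_equal_replace_in_place : Prop := ∀ (string : String), Dom_replace_in_place string → Spec_replace_in_place string (replace_in_place string)

-- ===== LEMMAS AND PROOFS =====

-- the common specification: one greedy left-to-right non-overlapping scan
def scanAB : List Char → List Char
  | [] => []
  | 'A' :: 'B' :: t => 'C' :: scanAB t
  | c :: t => c :: scanAB t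

theorem scanAB_cons_of_ne (c : Char) (t : List Char)
    (h : ¬ (c = 'A' ∧ t.head? = some 'B')) : scanAB (c :: t) = c :: scanAB t := by
  match c, t with
  | c, [] =>
    by_cases hc : c = 'A' <;> simp [scanAB, hc]
  | c, d :: t =>
    by_cases hc : c = 'A'
    · by_cases hd : d = 'B'
      · exact absurd ⟨hc, by simp [hd]⟩ h
      · subst hc; simp [scanAB, hd]
    · simp [scanAB, hc]

theorem replace_go_eq_scanAB (fuel : Nat) (l acc : List Char) (hf : l.length ≤ fuel) :
    PySem.Chars.replace.go ['A', 'B'] ['C'] fuel l acc = acc.reverse ++ scanAB l := by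
  induction fuel generalizing l acc with
  | zero =>
    have : l = [] := List.eq_nil_of_length_eq_zero (Nat.le_zero.mp hf)
    subst this; simp [PySem.Chars.replace.go, scanAB]
  | succ n ih =>
    match l with
    | [] => simp [PySem.Chars.replace.go, scanAB]
    | c :: t =>
      simp only [PySem.Chars.replace.go]
      by_cases hp : List.isPrefixOf ['A', 'B'] (c :: t) = true
      · rw [if_pos hp]
        match t, hp with
        | d :: t', hp =>
          simp only [List.isPrefixOf, Bool.and_true, Bool.and_eq_true,
            beq_iff_eq] at hp
          obtain ⟨rfl, rfl⟩ := hp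
          have hd : List.drop (['A', 'B'] : List Char).length ('A' :: 'B' :: t') = t' := rfl
          rw [hd, ih t' _ (by simp at hf; omega)]
          simp [scanAB]
        | [], hp => simp [List.isPrefixOf] at hp
      · rw [if_neg hp]
        rw [ih _ _ (by simp at hf; omega)]
        have hne : ¬ (c = 'A' ∧ t.head? = some 'B') := by
          rintro ⟨rfl, hh⟩
          cases t with
          | nil => simp at hh
          | cons d t' =>
            simp only [List.head?_cons, Option.some.injEq] at hh
            subst hh
            simp [List.isPrefixOf] at hp
        rw [scanAB_cons_of_ne c t hne]
        simp

theorem chars_replace_eq_scanAB (s : List Char) :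
    PySem.Chars.replace s ['A', 'B'] ['C'] = scanAB s := by
  rw [PySem.Chars.replace]
  rw [if_neg (by decide)]
  exact replace_go_eq_scanAB s.length s [] le_rfl

theorem take_succ_set (s : List Char) (i : Nat) (c : Char) (h : i < s.length) :
    (s.set i c).take (i + 1) = s.take i ++ [c] := by
  induction s generalizing i with
  | nil => simp at h
  | cons a t ih =>
    match i with
    | 0 => simp
    | Nat.succ k =>
      simp only [List.set, List.take, List.cons_append]
      rw [ih k (by simpa using h)]

-- loop invariant of A: the kept prefix grows by what the scan produces
theorem replace_in_place_loop_spec (n : Nat) :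
    ∀ (s : List Char) (i j : Nat), s.length - j ≤ n → i ≤ j →
    (replace_in_place_loop s i j).1.take (replace_in_place_loop s i j).2
      = s.take i ++ scanAB (s.drop j) := by
  induction n with
  | zero =>
    intro s i j hn hij
    have hj : s.length ≤ j := by omega
    rw [replace_in_place_loop]
    rw [if_neg (by omega)]
    rw [if_neg (by omega)]
    rw [List.drop_eq_nil_of_le hj]
    simp [scanAB]
  | succ n ih =>
    intro s i j hn hij
    rw [replace_in_place_loop]
    by_cases hlt : (j : Int) < (s.length : Int) - 1
    · rw [if_pos hlt]
      have hj1 : j + 1 < s.length := by omega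
      have hj : j < s.length := by omega
      have hi : i < s.length := by omega
      have hgj : PySem.List.pyGet? s (j : Int) = some s[j] := by
        rw [PySem.List.pyGet?_natCast]
        exact List.getElem?_eq_getElem hj
      have hgj1 : PySem.List.pyGet? s ((j : Int) + 1) = some s[j+1] := by
        have hc : ((j : Int) + 1) = ((j + 1 : Nat) : Int) := by push_cast; ring
        rw [hc, PySem.List.pyGet?_natCast]
        exact List.getElem?_eq_getElem hj1
      by_cases hm : PySem.List.pyGet? s (j : Int) = some 'A' ∧ PySem.List.pyGet? s ((j : Int) + 1) = some 'B'
      · rw [if_pos hm]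
        have hA : s[j] = 'A' := by rw [hgj] at hm; exact (Option.some.inj hm.1)
        have hB : s[j+1] = 'B' := by rw [hgj1] at hm; exact (Option.some.inj hm.2)
        rw [ih (s.set i 'C') (i+1) (j+2) (by rw [List.length_set]; omega) (by omega)]
        rw [take_succ_set s i 'C' hi]
        rw [List.drop_set, if_pos (by omega)]
        rw [List.drop_eq_getElem_cons hj, List.drop_eq_getElem_cons hj1, hA, hB]
        simp [scanAB]
      · rw [if_neg hm]
        have hv : (PySem.List.pyGet? s (j : Int)).getD ' ' = s[j] := by rw [hgj]; rfl
        rw [ih _ (i+1) (j+1) (by rw [List.length_set]; omega) (by omega)]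
        rw [hv, take_succ_set s i s[j] hi]
        rw [List.drop_set, if_pos (by omega)]
        rw [List.drop_eq_getElem_cons hj]
        have hne : ¬ (s[j] = 'A' ∧ (s.drop (j+1)).head? = some 'B') := by
          rintro ⟨h1, h2⟩
          apply hm
          rw [List.drop_eq_getElem_cons hj1] at h2
          simp only [List.head?_cons, Option.some.injEq] at h2
          exact ⟨by rw [hgj, h1], by rw [hgj1, h2]⟩
        rw [scanAB_cons_of_ne _ _ hne]
        simp
    · rw [if_neg hlt]
      by_cases he : (j : Int) = (s.length : Int) - 1
      · rw [if_pos he]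
        have hj : j < s.length := by omega
        have hi : i < s.length := by omega
        have hgj : PySem.List.pyGet? s (j : Int) = some s[j] := by
          rw [PySem.List.pyGet?_natCast]
          exact List.getElem?_eq_getElem hj
        simp only
        rw [hgj]
        simp only [Option.getD_some]
        rw [take_succ_set s i s[j] hi]
        rw [List.drop_eq_getElem_cons hj]
        have : s.drop (j+1) = [] := List.drop_eq_nil_of_le (by omega)
        rw [this]
        have hsc : scanAB [s[j]] = [s[j]] := by
          by_cases hc : s[j] = 'A' <;> simp [scanAB, hc]
        rw [hsc]
      · rw [if_neg he]
        have hj : s.length ≤ j := by omega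
        rw [List.drop_eq_nil_of_le hj]
        simp [scanAB]

-- ===== VERDICT (by name: the statement is the Claim_ definition above) =====
theorem replace_in_place_spec : Claim_equal_replace_in_place := by
  intro s _
  unfold Spec_replace_in_place replace_in_place replace_in_place_alt
  rw [PySem.Str.replace]
  have hAB : ("AB" : String).toList = ['A', 'B'] := by decide
  have hC : ("C" : String).toList = ['C'] := by decide
  rw [hAB, hC, chars_replace_eq_scanAB]
  simp only
  rw [replace_in_place_loop_spec (s.toList.length) s.toList 0 0 (by omega) (le_refl 0)]
  simp
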